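-- pv_equiv track=rewrite | github.com/dirmue/AoC | 2021/Day16/day16.py | decode_literal
-- ===== SOURCE A (Python) =====
-- def decode_literal(data):
--     lit_len = 0
--     lit_str = ''
--     while True:
--         more = data[0]
--         lit_str += data[1:5]
--         lit_len += 5
--         if more == '0':
--             break
--         data = data[5:]
--     literal = int(lit_str, 2)
--     return lit_len, literal
-- ===== SOURCE B (Python) =====
-- def decode_literal(data):
--     # locate the start offset of the terminating group (continuation bit '0')
--     i = 0
--     while data[i] != '0':
--         i += 5
--     # gather all payload nibbles in one pass, then convert once
--     bits = ''.join(data[j + 1:j + 5] for j in range(0, i + 1, 5))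
--     return i + 5, int(bits, 2)
-- ===== Notes on version B (the rewrite author's own statement) =====
-- stated objective: alternative
-- what changed: A's single while-loop that accumulates the payload string and advances the data in lockstep is replaced by two separate phases: an index scan over the continuation bits to locate the terminating group, then one gather step that joins the payload slices and converts once.
import Mathlib
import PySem

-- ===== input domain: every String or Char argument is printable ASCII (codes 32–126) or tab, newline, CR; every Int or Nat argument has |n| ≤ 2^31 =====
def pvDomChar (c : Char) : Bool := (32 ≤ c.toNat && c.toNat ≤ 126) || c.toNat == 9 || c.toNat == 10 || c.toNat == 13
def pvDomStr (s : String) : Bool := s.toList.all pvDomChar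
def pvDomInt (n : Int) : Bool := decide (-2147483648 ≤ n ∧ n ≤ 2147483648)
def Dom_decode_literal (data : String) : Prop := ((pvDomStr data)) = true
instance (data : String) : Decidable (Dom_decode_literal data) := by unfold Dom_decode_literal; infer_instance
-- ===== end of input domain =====

-- B splits A's single accumulate-and-advance loop into a locate-the-terminator index scan
-- followed by one gather-and-convert step (alternative decomposition; same asymptotic cost).


-- ===== PORT A =====
-- the while-True loop of A: data[0] (IndexError → none), lit_str += data[1:5], lit_len += 5,
-- break on '0', else data = data[5:]
def decodeLoopA : List Char → Int → List Char → Option (Int × List Char)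
  | [], _, _ => none   -- data[0] raises IndexError (excluded by Pre_)
  | more :: rest, lit_len, lit_str =>
      let lit_str' := lit_str ++ PySem.List.slice (more :: rest) (some 1) (some 5)
      let lit_len' := lit_len + 5
      if more = '0' then some (lit_len', lit_str')
      else decodeLoopA ((more :: rest).drop 5) lit_len' lit_str'
termination_by l _ _ => l.length
decreasing_by simp only [List.length_drop, List.length_cons]; omega

def decode_literal (data : String) : Int × Int :=
  match decodeLoopA data.toList 0 [] with
  | none => (0, 0)   -- unreachable under Pre_ (A raises IndexError)
  | some (lit_len, lit_str) =>
      match PySem.Int.ofCharsBase? lit_str 2 with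
      | none => (0, 0)   -- unreachable under Pre_ (int(lit_str, 2) raises ValueError)
      | some literal => (lit_len, literal)

-- ===== PORT B =====
-- B's first loop: while data[i] != '0': i += 5  (terminator offset; none = IndexError, i ≥ len)
def scanB (l : List Char) (i : Nat) : Option Nat :=
  if h : i < l.length then
    if l[i] = '0' then some i else scanB l (i + 5)
  else none   -- data[i] raises IndexError (excluded by Pre_)
termination_by l.length - i
decreasing_by omega

def decode_literal_alt (data : String) : Int × Int :=
  let l := data.toList
  match scanB l 0 with
  | none => (0, 0)
  | some i =>
      -- ''.join(data[j+1:j+5] for j in range(0, i+1, 5))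
      let bits := ((PySem.List.pyRange 0 ((i : Int) + 1) 5).map
        (fun j => PySem.List.slice l (some (j + 1)) (some (j + 5)))).flatten
      match PySem.Int.ofCharsBase? bits 2 with
      | none => (0, 0)
      | some v => ((i : Int) + 5, v)

-- ===== PRECONDITION & SPEC =====
-- Pre_: exactly the inputs on which A returns: some group offset i (a multiple of 5, the first
-- one) holds the terminating '0', and the concatenated 4-bit payload slices parse as a base-2 int
-- (otherwise A raises IndexError resp. ValueError).
def Pre_decode_literal (data : String) : Prop :=
  ∃ i < data.toList.length, i % 5 = 0 ∧ data.toList[i]? = some '0' ∧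
    (∀ j, j < i → j % 5 = 0 → data.toList[j]? ≠ some '0') ∧
    PySem.Int.ofCharsBase?
      (((List.range (i / 5 + 1)).map
        (fun g => (data.toList.drop (5 * g + 1)).take 4)).flatten) 2 ≠ none
instance (data : String) : Decidable (Pre_decode_literal data) := by
  unfold Pre_decode_literal; infer_instance

def pvWitness_decode_literal : String := ("00101")

def Spec_decode_literal (data : String) (out : Int × Int) : Prop := out = decode_literal_alt data
instance (data : String) (out : Int × Int) : Decidable (Spec_decode_literal data out) := by
  unfold Spec_decode_literal; infer_instance

-- ===== CLAIM (what is proved, stated in full; the proofs are below) =====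
def Claim_equal_decode_literal : Prop := ∀ (data : String), Dom_decode_literal data →
  Pre_decode_literal data → Spec_decode_literal data (decode_literal data)

-- ===== LEMMAS AND PROOFS =====

-- the payload of the first g groups of l, as a plain List function
def payloadOf (l : List Char) (g : Nat) : List Char :=
  ((List.range g).map (fun k => (l.drop (5 * k + 1)).take 4)).flatten

theorem slice_one_five (l : List Char) :
    PySem.List.slice l (some 1) (some 5) = (l.drop 1).take 4 := by
  have h := PySem.List.slice_natCast_add l 1 4
  push_cast at h
  simpa using h

theorem decodeLoopA_nil (len : Int) (acc : List Char) : decodeLoopA [] len acc = none := by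
  rw [decodeLoopA.eq_def]

theorem decodeLoopA_cons (c : Char) (t : List Char) (len : Int) (acc : List Char) :
    decodeLoopA (c :: t) len acc =
      if c = '0' then some (len + 5, acc ++ PySem.List.slice (c :: t) (some 1) (some 5))
      else decodeLoopA ((c :: t).drop 5) (len + 5)
        (acc ++ PySem.List.slice (c :: t) (some 1) (some 5)) := by
  rw [decodeLoopA.eq_def]

theorem scanB_stop (l : List Char) (i : Nat) (h : ¬ i < l.length) : scanB l i = none := by
  rw [scanB]; rw [dif_neg h]

theorem scanB_step (l : List Char) (i : Nat) (h : i < l.length) :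
    scanB l i = if l[i] = '0' then some i else scanB l (i + 5) := by
  rw [scanB]; rw [dif_pos h]

theorem payload_succ (l : List Char) (g : Nat) :
    payloadOf l (g + 1) = (l.drop 1).take 4 ++ payloadOf (l.drop 5) g := by
  unfold payloadOf
  rw [List.range_succ_eq_map]
  simp only [List.map_cons, List.map_map, List.flatten_cons, Nat.mul_zero, Nat.zero_add]
  congr 1
  apply congrArg List.flatten
  apply List.map_congr_left
  intro k _
  simp only [Function.comp]
  rw [List.drop_drop]
  congr 2
  omega

theorem bits_eq (l : List Char) (i : Nat) (h5 : i % 5 = 0) :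
    ((PySem.List.pyRange 0 ((i : Int) + 1) 5).map
        (fun j => PySem.List.slice l (some (j + 1)) (some (j + 5)))).flatten
      = payloadOf l (i / 5 + 1) := by
  rw [PySem.List.pyRange_of_pos 0 ((i : Int) + 1) (by norm_num)]
  have hcount : (if (0 : Int) < (i : Int) + 1 then
      (((i : Int) + 1 - 0 + 5 - 1) / 5).toNat else 0) = i / 5 + 1 := by
    rw [if_pos (by positivity)]
    omega
  rw [hcount]
  unfold payloadOf
  rw [List.map_map]
  apply congrArg List.flatten
  apply List.map_congr_left
  intro k _
  simp only [Function.comp]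
  have h1 : (0 : Int) + 5 * (k : Int) + 1 = ((5 * k + 1 : Nat) : Int) := by push_cast; ring
  have h2 : (0 : Int) + 5 * (k : Int) + 5 = ((5 * k + 1 : Nat) : Int) + ((4 : Nat) : Int) := by
    push_cast; ring
  rw [h1, h2, PySem.List.slice_natCast_add]

-- scanning from offset i+5 is scanning the 5-dropped list from offset i, shifted back
theorem scanB_shift (l : List Char) (i : Nat) :
    scanB l (i + 5) = (scanB (l.drop 5) i).map (· + 5) := by
  by_cases hlen : i + 5 < l.length
  case pos =>
    have hd : i < (l.drop 5).length := by simp; omega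
    rw [scanB_step l (i + 5) hlen, scanB_step (l.drop 5) i hd]
    have he : (l.drop 5)[i] = l[i + 5] := by
      rw [List.getElem_drop]; congr 1; omega
    rw [he]
    by_cases hc : l[i + 5] = '0'
    · simp [hc]
    · simp only [hc, if_false]
      exact scanB_shift l (i + 5)
  case neg =>
    rw [scanB_stop l (i + 5) hlen, scanB_stop (l.drop 5) i (by simp; omega)]
    simp
termination_by l.length - i
decreasing_by omega

-- scanB always lands on multiples of 5
theorem scanB_mod (l : List Char) (i : Nat) (h5 : i % 5 = 0) (r : Nat)
    (hr : scanB l i = some r) : r % 5 = 0 := by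
  by_cases h : i < l.length
  · rw [scanB_step l i h] at hr
    by_cases hc : l[i] = '0'
    · simp [hc] at hr; omega
    · simp only [hc, if_false] at hr
      exact scanB_mod l (i + 5) (by omega) r hr
  · rw [scanB_stop l i h] at hr; simp at hr
termination_by l.length - i
decreasing_by omega

-- the main loop invariant: A's loop equals B's scan followed by the gathered payload
theorem loop_eq (n : Nat) (l : List Char) (len : Int) (acc : List Char)
    (hn : l.length ≤ n) :
    decodeLoopA l len acc =
      (scanB l 0).map (fun (i : Nat) => (len + (i : Int) + 5, acc ++ payloadOf l (i / 5 + 1))) := by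
  induction n generalizing l len acc with
  | zero =>
      have hl : l = [] := by cases l <;> simp_all
      subst hl
      rw [scanB_stop _ _ (by simp), decodeLoopA_nil]
      rfl
  | succ n ih =>
      cases l with
      | nil =>
          rw [scanB_stop _ _ (by simp), decodeLoopA_nil]
          rfl
      | cons c t =>
          rw [decodeLoopA_cons, scanB_step (c :: t) 0 (by simp)]
          simp only [List.getElem_cons_zero]
          by_cases hc : c = '0'
          · simp only [hc, if_true, Option.map_some]
            simp [payloadOf, slice_one_five]
          · simp only [hc, if_false]
            have hshift : scanB (c :: t) (0 + 5) =
                (scanB ((c :: t).drop 5) 0).map (· + 5) := scanB_shift (c :: t) 0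
            simp only [Nat.zero_add] at hshift
            rw [hshift]
            rw [ih ((c :: t).drop 5) (len + 5) (acc ++ PySem.List.slice (c :: t) (some 1) (some 5))
              (by simp only [List.length_drop, List.length_cons] at hn ⊢; omega)]
            rw [Option.map_map]
            apply Option.map_congr
            intro i _
            simp only [Function.comp]
            rw [Prod.mk.injEq]
            refine ⟨by push_cast; ring, ?_⟩
            rw [slice_one_five, List.append_assoc, ← payload_succ]
            congr 2
            omega

-- ===== VERDICT (by name: the statement is the Claim_ definition above) =====
theorem decode_literal_spec : Claim_equal_decode_literal := by
  intro data _ _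
  unfold Spec_decode_literal decode_literal decode_literal_alt
  rw [loop_eq data.toList.length data.toList 0 [] (le_refl _)]
  cases hs : scanB data.toList 0 with
  | none => simp only [hs, Option.map_none]
  | some i =>
      simp only [hs, Option.map_some, List.nil_append]
      rw [bits_eq data.toList i (scanB_mod data.toList 0 rfl i hs)]
      cases h2 : PySem.Int.ofCharsBase? (payloadOf data.toList (i / 5 + 1)) 2 with
      | none => rfl
      | some v =>
          refine Prod.ext ?_ rfl
          show (0 : Int) + (i : Int) + 5 = (i : Int) + 5
          ring
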